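-- pv_equiv track=rewrite | github.com/cobbler/cobbler | cobbler/settings/migrations/__init__.py | filter_settings_to_validate
-- ===== SOURCE A (Python) =====
-- from typing import Dict, List, Union, Optional, Tuple
--
-- def filter_settings_to_validate(settings: dict, ignore_keys: Optional[List[str]] = None) -> Tuple[dict, dict]:
--     """
--     Separate settings to validate from the ones to exclude from validation
--     according to "ignore_keys" parameter and "extra_settings_list" setting value.
--     :param settings: The settings dict to validate.
--     :param ignore_keys: The list of ignore keys to exclude from validation.
--     :return data: The filtered settings to validate
--     :return data_to_exclude: The settings that were excluded from the validation
--     """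
--     if not ignore_keys:
--         ignore_keys = []
--
--     extra_settings = settings.get("extra_settings_list", [])
--     data_to_exclude = {
--         k: settings[k] for k in settings if k in ignore_keys or k in extra_settings
--     }
--     data = {
--         x: settings[x]
--         for x in settings
--         if x not in ignore_keys and x not in extra_settings
--     }
--     return data, data_to_exclude
-- ===== SOURCE B (Python) =====
-- def filter_settings_to_validate(settings: dict, ignore_keys=None):
--     # Subtractive algorithm: copy settings, delete the ignored/extra keys from
--     # the copy (iterating over the exclusion lists, not over settings), then
--     # recover the excluded entries as the dict difference.
--     data = dict(settings)
--     for k in (ignore_keys or []):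
--         data.pop(k, None)
--     for k in settings.get("extra_settings_list", []):
--         data.pop(k, None)
--     data_to_exclude = {k: v for k, v in settings.items() if k not in data}
--     return data, data_to_exclude
-- ===== Notes on version B (the rewrite author's own statement) =====
-- stated objective: faster
-- what changed: Replaces A's two comprehension passes that test every settings key by linear membership in the ignore/extra lists with a subtractive algorithm: copy the dict, iterate over the ignore and extra lists popping those keys from the copy (data), then obtain data_to_exclude as the dict difference settings-minus-data via O(1) dict membership.
import Mathlib
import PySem

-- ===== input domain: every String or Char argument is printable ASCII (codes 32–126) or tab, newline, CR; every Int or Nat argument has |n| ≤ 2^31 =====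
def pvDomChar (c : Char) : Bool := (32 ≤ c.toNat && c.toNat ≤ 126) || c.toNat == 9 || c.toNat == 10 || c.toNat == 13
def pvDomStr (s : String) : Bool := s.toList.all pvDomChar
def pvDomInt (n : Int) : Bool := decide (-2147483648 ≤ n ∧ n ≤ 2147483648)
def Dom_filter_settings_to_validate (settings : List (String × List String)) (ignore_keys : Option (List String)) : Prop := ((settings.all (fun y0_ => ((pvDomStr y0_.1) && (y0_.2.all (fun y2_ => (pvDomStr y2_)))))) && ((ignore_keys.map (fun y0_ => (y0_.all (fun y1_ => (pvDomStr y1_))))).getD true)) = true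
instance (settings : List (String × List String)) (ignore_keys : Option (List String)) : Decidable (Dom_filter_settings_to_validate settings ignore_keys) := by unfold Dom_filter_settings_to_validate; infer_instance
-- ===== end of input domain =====

-- B replaces A's two comprehension passes over settings with a subtractive algorithm (copy the dict, pop the ignore/extra keys from the copy, take the dict difference); objective: faster (dict membership instead of list membership).


-- ===== PORT A =====
-- `if not ignore_keys: ignore_keys = []` maps None and [] both to []; the dict parameter is
-- normalized with PySem.Dict.ofList (Python dict construction), then two comprehension passes,
-- each testing every key by list membership in ignore_keys / extra_settings.
def filter_settings_to_validate (settings : List (String × List String)) (ignore_keys : Option (List String)) : (List (String × List String)) × (List (String × List String)) :=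
  let ig : List String := ignore_keys.getD []
  let d : PySem.Dict String (List String) := PySem.Dict.ofList settings
  let extra : List String := d.getD "extra_settings_list" []
  let data_to_exclude : List (String × List String) :=
    (d.keys.filter (fun k => decide (k ∈ ig) || decide (k ∈ extra))).map (fun k => (k, d.getD k []))
  let data : List (String × List String) :=
    (d.keys.filter (fun x => !decide (x ∈ ig) && !decide (x ∈ extra))).map (fun x => (x, d.getD x []))
  (data, data_to_exclude)

-- ===== PORT B =====
-- subtractive algorithm: `data = dict(settings)` then `data.pop(k, None)` for each k of the
-- ignore list and of the extra list (PySem.Dict.erase = pop with default), then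
-- `data_to_exclude = {k: v for k, v in settings.items() if k not in data}` (dict difference).
def filter_settings_to_validate_alt (settings : List (String × List String)) (ignore_keys : Option (List String)) : (List (String × List String)) × (List (String × List String)) :=
  let d0 : PySem.Dict String (List String) := PySem.Dict.ofList settings
  let d1 : PySem.Dict String (List String) := (ignore_keys.getD []).foldl (fun d k => d.erase k) d0
  let data : PySem.Dict String (List String) := (d0.getD "extra_settings_list" []).foldl (fun d k => d.erase k) d1
  let data_to_exclude : List (String × List String) := d0.items.filter (fun p => !data.contains p.1)
  (data.items, data_to_exclude)

-- ===== PRECONDITION & SPEC =====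
def Spec_filter_settings_to_validate (settings : List (String × List String)) (ignore_keys : Option (List String)) (out : (List (String × List String)) × (List (String × List String))) : Prop := out = filter_settings_to_validate_alt settings ignore_keys
instance (settings : List (String × List String)) (ignore_keys : Option (List String)) (out : (List (String × List String)) × (List (String × List String))) : Decidable (Spec_filter_settings_to_validate settings ignore_keys out) := by unfold Spec_filter_settings_to_validate; infer_instance

-- ===== CLAIM =====
def Claim_equal_filter_settings_to_validate : Prop := ∀ (settings : List (String × List String)) (ignore_keys : Option (List String)), Dom_filter_settings_to_validate settings ignore_keys → Spec_filter_settings_to_validate settings ignore_keys (filter_settings_to_validate settings ignore_keys)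

-- ===== LEMMAS AND PROOFS =====

-- a fold of dict-erases over a key list filters the items by non-membership of the key
theorem pv_foldl_erase_items {ν : Type} (E : List String) (d : PySem.Dict String ν) :
    ((E.foldl (fun d k => d.erase k) d)).items
      = d.items.filter (fun p => !E.contains p.1) := by
  induction E generalizing d with
  | nil => simp
  | cons k E ih =>
    rw [List.foldl_cons, ih]
    show List.filter _ (PySem.Dict.erase d k).items = _
    simp only [PySem.Dict.erase, List.filter_filter]
    apply List.filter_congr
    intro p _
    simp only [Bool.and_comm]
    cases h : p.1 == k
    · have hne : ¬ p.1 = k := by intro e; subst e; simp at h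
      simp [hne]
    · have he : p.1 = k := eq_of_beq h
      simp [he]

-- fst is injective on the items of a dict with Nodup keys
theorem pv_fst_inj {ν : Type} (d : PySem.Dict String ν) (hnd : d.keys.Nodup)
    (p q : String × ν) (hp : p ∈ d.items) (hq : q ∈ d.items) (h : p.1 = q.1) : p = q :=
  List.inj_on_of_nodup_map hnd hp hq h

theorem filter_settings_to_validate_eq (settings : List (String × List String)) (ignore_keys : Option (List String)) :
    filter_settings_to_validate settings ignore_keys = filter_settings_to_validate_alt settings ignore_keys := by
  simp only [filter_settings_to_validate, filter_settings_to_validate_alt]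
  set d : PySem.Dict String (List String) := PySem.Dict.ofList settings with hd
  have hnd : d.keys.Nodup := by rw [hd]; exact PySem.Dict.nodup_keys_ofList settings
  set ig : List String := ignore_keys.getD [] with hig
  set extra : List String := d.getD "extra_settings_list" [] with hextra
  have hdata : ((d.getD "extra_settings_list" []).foldl (fun d k => d.erase k) (ig.foldl (fun d k => d.erase k) d)).items
      = d.items.filter (fun p => !decide (p.1 ∈ ig) && !decide (p.1 ∈ extra)) := by
    rw [pv_foldl_erase_items, pv_foldl_erase_items, List.filter_filter]
    apply List.filter_congr
    intro p _
    simp [← hextra, Bool.and_comm]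
  have hitems : d.items = d.keys.map (fun k => (k, d.getD k [])) :=
    PySem.Dict.items_eq_map_keys d hnd []
  rw [Prod.mk.injEq]
  constructor
  · -- data component
    rw [hdata, hitems, List.filter_map]
    simp [Function.comp_def]
  · -- data_to_exclude component
    have hmem : ∀ p ∈ d.items,
        (!(PySem.Dict.contains ((d.getD "extra_settings_list" []).foldl (fun d k => d.erase k) (ig.foldl (fun d k => d.erase k) d)) p.1))
          = (decide (p.1 ∈ ig) || decide (p.1 ∈ extra)) := by
      intro p hp
      rw [PySem.Dict.contains_eq_decide_mem_keys]
      simp only [PySem.Dict.keys, hdata]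
      by_cases hin : p.1 ∈ ig ∨ p.1 ∈ extra
      · have hL : p.1 ∉ (d.items.filter (fun p => !decide (p.1 ∈ ig) && !decide (p.1 ∈ extra))).map (fun x => x.1) := by
          intro hmem'
          rcases List.mem_map.mp hmem' with ⟨q, hq, hq1⟩
          rcases List.mem_filter.mp hq with ⟨hqd, hqpred⟩
          have hqp := pv_fst_inj d hnd q p hqd hp hq1
          subst hqp
          rcases hin with h | h <;> simp [h] at hqpred
        rcases hin with h | h <;> simp [h, hL]
      · rw [not_or] at hin
        have hR : p.1 ∈ (d.items.filter (fun p => !decide (p.1 ∈ ig) && !decide (p.1 ∈ extra))).map (fun x => x.1) :=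
          List.mem_map.mpr ⟨p, List.mem_filter.mpr ⟨hp, by simp [hin.1, hin.2]⟩, rfl⟩
        simp [hin.1, hin.2, hR]
    rw [List.filter_congr hmem, hitems, List.filter_map]
    simp [Function.comp_def]

-- ===== VERDICT =====
theorem filter_settings_to_validate_spec : Claim_equal_filter_settings_to_validate := by
  intro settings ignore_keys _
  exact filter_settings_to_validate_eq settings ignore_keys
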